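-- pv_equiv track=rewrite | github.com/alex17-sys/stdlib-sniper | snippets_py/data_structures/lists/list_chunk_demo.py | chunk_list_with_fill
-- ===== SOURCE A (Python) =====
-- def chunk_list_with_fill(lst, chunk_size, fill_value=None):
--     """Split list into chunks with fill value for incomplete chunks."""
--     if chunk_size <= 0:
--         raise ValueError("Chunk size must be positive")
--
--     chunks = []
--     for i in range(0, len(lst), chunk_size):
--         chunk = lst[i : i + chunk_size]
--         # Pad incomplete chunk with fill value
--         while len(chunk) < chunk_size:
--             chunk.append(fill_value)
--         chunks.append(chunk)
--
--     return chunks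
-- ===== SOURCE B (Python) =====
-- def chunk_list_with_fill(lst, chunk_size, fill_value=None):
--     """Split list into chunks with fill value for incomplete chunks."""
--     if chunk_size <= 0:
--         raise ValueError("Chunk size must be positive")
--     rem = len(lst) % chunk_size
--     padded = list(lst) + [fill_value] * (chunk_size - rem if rem else 0)
--     return [padded[i : i + chunk_size] for i in range(0, len(padded), chunk_size)]
-- ===== Notes on version B (the rewrite author's own statement) =====
-- stated objective: idiomatic
-- what changed: B pads the whole list once up front (len(lst) % chunk_size arithmetic) and then slices it in a single comprehension, instead of A's per-chunk while-loop that appends fill values one element at a time.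
-- outside the precondition, e.g. on chunk_list_with_fill([1, 2, 3], 2, None): A returns [[1, 2], [3, None]], B returns [[1, 2], [3, None]]
import Mathlib
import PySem

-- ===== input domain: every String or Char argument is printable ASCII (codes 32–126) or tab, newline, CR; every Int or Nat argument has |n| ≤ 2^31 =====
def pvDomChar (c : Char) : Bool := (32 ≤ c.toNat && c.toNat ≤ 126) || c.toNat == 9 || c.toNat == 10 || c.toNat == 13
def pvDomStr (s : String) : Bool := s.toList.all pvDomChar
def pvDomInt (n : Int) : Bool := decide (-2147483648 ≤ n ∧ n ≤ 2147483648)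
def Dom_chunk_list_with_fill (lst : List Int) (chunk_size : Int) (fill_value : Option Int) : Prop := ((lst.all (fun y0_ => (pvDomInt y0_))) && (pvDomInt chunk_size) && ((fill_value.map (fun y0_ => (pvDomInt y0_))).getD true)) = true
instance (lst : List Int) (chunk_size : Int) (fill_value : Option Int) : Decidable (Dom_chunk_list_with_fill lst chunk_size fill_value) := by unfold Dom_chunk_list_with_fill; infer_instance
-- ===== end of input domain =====

-- B pads the whole list once up front (length % chunk_size arithmetic) and slices it in
-- one comprehension, replacing A's per-chunk while-loop padding; objective: idiomatic.

-- ===== PORT A =====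
-- the `while len(chunk) < chunk_size: chunk.append(fill_value)` loop; under Pre_ the
-- fill value is only ever appended when fill_value is `some`, so `f` is its payload
def padChunkA (chunk_size : Int) (f : Int) (chunk : List Int) : List Int :=
  if ((chunk.length : Int) < chunk_size) then padChunkA chunk_size f (chunk ++ [f]) else chunk
  termination_by (chunk_size - chunk.length).toNat
  decreasing_by simp only [List.length_append, List.length_cons, List.length_nil]; omega

def chunk_list_with_fill (lst : List Int) (chunk_size : Int) (fill_value : Option Int) : List (List Int) :=
  if chunk_size ≤ 0 then []  -- Python raises ValueError here; excluded by Pre_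
  else
    (PySem.List.pyRange 0 lst.length chunk_size).foldl
      (fun chunks i =>
        chunks ++ [padChunkA chunk_size (fill_value.getD 0) (PySem.List.slice lst (some i) (some (i + chunk_size)))]) []

-- ===== PORT B =====
def chunk_list_with_fill_alt (lst : List Int) (chunk_size : Int) (fill_value : Option Int) : List (List Int) :=
  if chunk_size ≤ 0 then []  -- Python raises ValueError here; excluded by Pre_
  else
    let rem := PySem.Int.mod (lst.length : Int) chunk_size
    let padded := lst ++ List.replicate (if rem = 0 then 0 else (chunk_size - rem).toNat) (fill_value.getD 0)
    (PySem.List.pyRange 0 padded.length chunk_size).map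
      (fun i => PySem.List.slice padded (some i) (some (i + chunk_size)))

-- ===== PRECONDITION & SPEC =====
-- Pre_ excludes chunk_size ≤ 0, where A raises ValueError, and the inputs where fill_value
-- is None while the last chunk is incomplete: there A pads chunks with None, a value that
-- is not an Int, so A's result leaves the declared return type List (List Int).
def Pre_chunk_list_with_fill (lst : List Int) (chunk_size : Int) (fill_value : Option Int) : Prop :=
  0 < chunk_size ∧ (fill_value.isSome ∨ PySem.Int.mod (lst.length : Int) chunk_size = 0)
instance (lst : List Int) (chunk_size : Int) (fill_value : Option Int) : Decidable (Pre_chunk_list_with_fill lst chunk_size fill_value) := by unfold Pre_chunk_list_with_fill; infer_instance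
def pvWitness_chunk_list_with_fill : List Int × Int × Option Int := ([1, 2, 3], 2, some 0)

def Spec_chunk_list_with_fill (lst : List Int) (chunk_size : Int) (fill_value : Option Int) (out : List (List Int)) : Prop := out = chunk_list_with_fill_alt lst chunk_size fill_value
instance (lst : List Int) (chunk_size : Int) (fill_value : Option Int) (out : List (List Int)) : Decidable (Spec_chunk_list_with_fill lst chunk_size fill_value out) := by unfold Spec_chunk_list_with_fill; infer_instance

-- ===== CLAIM (what is proved, stated in full; the proofs are below) =====
def Claim_equal_chunk_list_with_fill : Prop := ∀ (lst : List Int) (chunk_size : Int) (fill_value : Option Int), Dom_chunk_list_with_fill lst chunk_size fill_value → Pre_chunk_list_with_fill lst chunk_size fill_value → Spec_chunk_list_with_fill lst chunk_size fill_value (chunk_list_with_fill lst chunk_size fill_value)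

-- ===== LEMMAS AND PROOFS =====

-- the while-loop pads up to chunk_size with copies of f
lemma padChunkA_eq (chunk_size f : Int) (chunk : List Int) :
    padChunkA chunk_size f chunk = chunk ++ List.replicate (chunk_size - chunk.length).toNat f := by
  fun_induction padChunkA chunk_size f chunk with
  | case1 chunk h ih =>
      rw [ih]
      have h1 : (chunk_size - chunk.length).toNat = (chunk_size - ((chunk ++ [f]).length : Int)).toNat + 1 := by
        simp only [List.length_append, List.length_cons, List.length_nil]; omega
      rw [h1, List.replicate_succ, List.append_assoc]
      rfl
  | case2 chunk h =>
      have h1 : (chunk_size - chunk.length).toNat = 0 := by omega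
      simp [h1]

-- both ports agree whenever chunk_size is positive, for every fill_value
-- (both pad with fill_value.getD 0, so the fill condition of Pre_ is not needed here)
lemma ports_eq (lst : List Int) (chunk_size : Int) (hc : 0 < chunk_size) (fill_value : Option Int) :
    chunk_list_with_fill lst chunk_size fill_value = chunk_list_with_fill_alt lst chunk_size fill_value := by
  have hcle : ¬ chunk_size ≤ 0 := by omega
  set f : Int := fill_value.getD 0 with hf
  set n : Nat := lst.length with hn
  set rem : Int := PySem.Int.mod (n : Int) chunk_size with hrem
  have hrem' : rem = (n : Int) % chunk_size := PySem.Int.mod_eq_emod_of_pos hc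
  set K : Nat := if rem = 0 then 0 else (chunk_size - rem).toNat with hK
  set padded : List Int := lst ++ List.replicate K f with hpadded
  have hpl : (padded.length : Int) = (n : Int) + (K : Int) := by
    simp [hpadded, hn]
  have hrem0 : 0 ≤ rem := by rw [hrem']; exact Int.emod_nonneg _ (by omega)
  have hremlt : rem < chunk_size := by rw [hrem']; exact Int.emod_lt_of_pos _ hc
  have hKint : (K : Int) = if rem = 0 then 0 else chunk_size - rem := by
    rw [hK]; split
    · simp
    · simp; omega
  -- the common chunk count m and the divisibility of the padded length
  have hqr : chunk_size * ((n : Int) / chunk_size) + rem = (n : Int) := by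
    rw [hrem', Int.mul_comm]; exact Int.ediv_mul_add_emod _ _
  set q : Int := (n : Int) / chunk_size with hq
  have hq0 : 0 ≤ q := Int.ediv_nonneg (by positivity) (by omega)
  set mI : Int := if rem = 0 then q else q + 1 with hm
  have hm0 : 0 ≤ mI := by rw [hm]; split <;> omega
  have hdiv : (n : Int) + (K : Int) = chunk_size * mI := by
    have he : chunk_size * (q + 1) = chunk_size * q + chunk_size := by ring
    rw [hKint, hm]; split <;> omega
  -- chunk counts of the two pyRanges
  have hceil : ∀ a : Int, 0 < a → (∃ t : Int, 0 ≤ t ∧ a + (chunk_size - 1 - t) = chunk_size * mI ∧ t < chunk_size) →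
      ((a - 0 + chunk_size - 1) / chunk_size).toNat = mI.toNat := by
    intro a ha ⟨t, ht0, hteq, htlt⟩
    have hcm : mI * chunk_size = chunk_size * mI := mul_comm _ _
    have : a - 0 + chunk_size - 1 = t + mI * chunk_size := by omega
    rw [this, Int.add_mul_ediv_right _ _ (by omega : chunk_size ≠ 0),
        Int.ediv_eq_zero_of_lt ht0 htlt]
    simp
  have hcountA : (if (0:Int) < (n:Int) then (((n:Int) - 0 + chunk_size - 1) / chunk_size).toNat else 0) = mI.toNat := by
    by_cases hn0 : (0:Int) < (n:Int)
    · rw [if_pos hn0]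
      refine hceil _ hn0 ?_
      by_cases hr0 : rem = 0
      · exact ⟨chunk_size - 1, by omega, by rw [← hdiv, hKint, if_pos hr0]; omega, by omega⟩
      · exact ⟨rem - 1, by omega, by rw [← hdiv, hKint, if_neg hr0]; omega, by omega⟩
    · rw [if_neg hn0]
      have hn00 : (n : Int) = 0 := by omega
      have hr0 : rem = 0 := by rw [hrem', hn00]; simp
      have : q = 0 := by rw [hq, hn00]; simp
      rw [hm, if_pos hr0, this]; rfl
  have hcountB : (if (0:Int) < (padded.length : Int) then (((padded.length : Int) - 0 + chunk_size - 1) / chunk_size).toNat else 0) = mI.toNat := by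
    by_cases hn0 : (0:Int) < (padded.length : Int)
    · rw [if_pos hn0]
      refine hceil _ hn0 ?_
      exact ⟨chunk_size - 1, by omega, by rw [hpl, hdiv]; omega, by omega⟩
    · rw [if_neg hn0]
      have hmI0 : mI = 0 := by
        by_contra h
        have h1 : 1 ≤ mI := by omega
        have h2 := mul_le_mul_of_nonneg_left h1 hc.le
        rw [mul_one] at h2
        omega
      rw [hmI0]; rfl
  -- unfold both ports to maps over List.range mI.toNat
  unfold chunk_list_with_fill chunk_list_with_fill_alt
  rw [if_neg hcle, if_neg hcle]
  simp only [← hf, ← hn, ← hrem, ← hK, ← hpadded]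
  rw [PySem.List.foldl_append_singleton_eq_map, PySem.List.pyRange_of_pos _ _ hc,
      PySem.List.pyRange_of_pos _ _ hc, List.nil_append, List.map_map, List.map_map]
  simp only [Int.sub_zero] at hcountA hcountB ⊢
  rw [show (if (0:Int) < (n:Int) then (((n:Int) + chunk_size - 1) / chunk_size).toNat else 0) = mI.toNat from hcountA,
      show (if (0:Int) < (padded.length : Int) then (((padded.length : Int) + chunk_size - 1) / chunk_size).toNat else 0) = mI.toNat from hcountB]
  refine List.map_congr_left ?_
  intro k hk
  have hkm : (k : Int) < mI := by
    have := List.mem_range.mp hk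
    omega
  -- the pointwise chunk equality
  simp only [Function.comp_apply, zero_add]
  rw [padChunkA_eq,
      PySem.List.slice_toNat _ (by positivity) (by positivity),
      PySem.List.slice_toNat _ (by positivity) (by positivity)]
  set j : Nat := (chunk_size * (k : Int)).toNat with hj
  have hknn : (0:Int) ≤ chunk_size * (k : Int) := by positivity
  have hjI : (j : Int) = chunk_size * (k : Int) := by omega
  have hcc : (chunk_size * (k : Int) + chunk_size).toNat - j = chunk_size.toNat := by omega
  rw [hcc]
  set c : Nat := chunk_size.toNat with hcn
  have hcI : (c : Int) = chunk_size := by omega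
  -- bounds: this chunk ends within the padded list, and starts within lst
  have hend : j + c ≤ n + K := by
    have hmul : chunk_size * ((k : Int) + 1) = chunk_size * (k : Int) + chunk_size := by ring
    have hle : chunk_size * ((k : Int) + 1) ≤ chunk_size * mI :=
      mul_le_mul_of_nonneg_left (by omega) hc.le
    omega
  have hKc : K = 0 ∨ K < c := by
    rcases eq_or_ne rem 0 with h | h
    · left; rw [hK, if_pos h]
    · right; rw [hK, if_neg h]; omega
  have hjn : j ≤ n := by omega
  -- right-hand side: drop then take through the append
  rw [hpadded, List.drop_append, List.take_append]
  have hd0 : j - lst.length = 0 := by omega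
  rw [← hn, hd0, List.drop_zero, List.take_replicate, List.length_take, List.length_drop, ← hn]
  -- the padding counts coincide
  have hcnt : (chunk_size - ((min c (n - j) : Nat) : Int)).toNat = min (c - (n - j)) K := by
    omega
  rw [hcnt]

-- ===== VERDICT (by name: the statement is the Claim_ definition above) =====
theorem chunk_list_with_fill_spec : Claim_equal_chunk_list_with_fill := by
  intro lst cs fv _ hpre
  unfold Spec_chunk_list_with_fill
  exact ports_eq lst cs hpre.1 fv
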